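-- pv_equiv track=rewrite | github.com/RenatTOP/ImageEncryption | tiles.py | compute_edges
-- ===== SOURCE A (Python) =====
-- from typing import List, Tuple
--
-- def compute_edges(n: int, size: int) -> List[int]:
--     """
--     Рахує межі так, щоб покрити весь size і розподілити "залишок" рівномірно
--     Наприклад, size=10, n=3 -> [0, 3, 7, 10] (блоки 3,4,3)
--     """
--     edges = [0]
--     base = size // n
--     rem = size % n  # скільки пікселів зайвих
--     acc = 0
--     for i in range(n):
--         step = base + (1 if i < rem else 0)  # першим rem блокам дається +1
--         acc += step
--         edges.append(acc)
--     edges[-1] = size  # щоб не було проблем з округленням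
--     return edges
-- ===== SOURCE B (Python) =====
-- def compute_edges(n: int, size: int):
--     base, rem = divmod(size, n)
--     return [i * base + min(i, rem) for i in range(n)] + [size]
-- ===== Notes on version B (the rewrite author's own statement) =====
-- stated objective: simpler
-- what changed: Replaces the running-sum accumulator loop (plus the final edges[-1]=size patch) with a closed-form comprehension computing each boundary independently as i*base + min(i, rem), appending size as the last edge.
import Mathlib
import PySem

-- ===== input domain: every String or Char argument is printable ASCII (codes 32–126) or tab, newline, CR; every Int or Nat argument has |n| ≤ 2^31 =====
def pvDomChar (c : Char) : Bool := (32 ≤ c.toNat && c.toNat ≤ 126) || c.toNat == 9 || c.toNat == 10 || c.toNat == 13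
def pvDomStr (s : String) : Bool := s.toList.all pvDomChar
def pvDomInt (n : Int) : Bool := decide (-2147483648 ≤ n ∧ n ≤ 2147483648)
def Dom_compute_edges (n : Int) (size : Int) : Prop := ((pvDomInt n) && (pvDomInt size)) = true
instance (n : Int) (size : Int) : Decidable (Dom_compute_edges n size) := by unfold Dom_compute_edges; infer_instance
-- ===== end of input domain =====

-- B replaces A's running-sum accumulator loop (and the final edges[-1]=size patch) with a
-- closed-form comprehension: edge i = i*base + min(i, rem), with size appended as the last edge (objective: simpler).


-- ===== PORT A =====
-- literal transliteration: edges=[0]; for i in range(n): acc += step; edges.append(acc); edges[-1]=size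
def compute_edges (n : Int) (size : Int) : List Int :=
  let edges : List Int := [0]
  let base := PySem.Int.floordiv size n
  let rem := PySem.Int.mod size n
  let st := (PySem.List.pyRange 0 n 1).foldl
    (fun (st : List Int × Int) i =>
      let step := base + (if i < rem then 1 else 0)
      let acc := st.2 + step
      (st.1 ++ [acc], acc)) (edges, 0)
  -- edges[-1] = size  (edges is nonempty: it starts as [0])
  st.1.dropLast ++ [size]

-- ===== PORT B =====
def compute_edges_alt (n : Int) (size : Int) : List Int :=
  let base := PySem.Int.floordiv size n
  let rem := PySem.Int.mod size n
  ((PySem.List.pyRange 0 n 1).map (fun i => i * base + min i rem)) ++ [size]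

-- ===== PRECONDITION & SPEC =====
-- Pre_ excludes exactly n = 0, where Python's '//' and '%' raise ZeroDivisionError.
def Pre_compute_edges (n : Int) (size : Int) : Prop := n ≠ 0
instance (n : Int) (size : Int) : Decidable (Pre_compute_edges n size) := by unfold Pre_compute_edges; infer_instance
def pvWitness_compute_edges : Int × Int := (3, 10)
def Spec_compute_edges (n : Int) (size : Int) (out : List Int) : Prop := out = compute_edges_alt n size
instance (n : Int) (size : Int) (out : List Int) : Decidable (Spec_compute_edges n size out) := by unfold Spec_compute_edges; infer_instance

-- ===== CLAIM (what is proved, stated in full; the proofs are below) =====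
def Claim_equal_compute_edges : Prop := ∀ (n : Int) (size : Int), Dom_compute_edges n size → Pre_compute_edges n size → Spec_compute_edges n size (compute_edges n size)

-- ===== LEMMAS AND PROOFS =====

-- the loop invariant: after folding over range m, edges = [edge 0, ..., edge m] and acc = edge m,
-- where edge i = i*base + min i rem (needs 0 <= rem, which holds whenever the range is nonempty)
theorem compute_edges_loop (base rem : Int) (hrem : 0 ≤ rem) (m : Nat) :
    (List.range m).foldl
      (fun (st : List Int × Int) (k : Nat) =>
        (st.1 ++ [st.2 + (base + (if (k:Int) < rem then 1 else 0))],
         st.2 + (base + (if (k:Int) < rem then 1 else 0)))) (([0] : List Int), (0:Int))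
    = ((List.range (m+1)).map (fun (k : Nat) => (k:Int) * base + min (k:Int) rem),
       (m:Int) * base + min (m:Int) rem) := by
  induction m with
  | zero =>
    simp
    omega
  | succ m ih =>
    rw [List.range_succ (n := m), List.foldl_append, ih]
    rw [List.range_succ (n := m+1), List.map_append]
    simp only [List.foldl_cons, List.foldl_nil, List.map_cons, List.map_nil]
    have key : (m:Int) * base + min (m:Int) rem + (base + (if (m:Int) < rem then 1 else 0))
        = ((m+1 : Nat):Int) * base + min ((m+1 : Nat):Int) rem := by
      by_cases h : (m:Int) < rem
      · have h1 : min (m:Int) rem = m := by omega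
        have h2 : min ((m:Int)+1) rem = (m:Int)+1 := by omega
        push_cast
        rw [h1, h2]
        simp [h]; ring
      · have h1 : min (m:Int) rem = rem := by omega
        have h2 : min ((m:Int)+1) rem = rem := by omega
        push_cast
        rw [h1, h2]
        simp [h]; ring
    rw [key]

-- ===== VERDICT (by name: the statement is the Claim_ definition above) =====
theorem compute_edges_spec : Claim_equal_compute_edges := by
  intro n size _ hpre
  unfold Spec_compute_edges compute_edges compute_edges_alt
  simp only []
  rw [PySem.List.pyRange_one]
  set base := PySem.Int.floordiv size n with hbase
  set rem := PySem.Int.mod size n with hrem'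
  by_cases hn : 0 < n
  · have hrem : 0 ≤ rem := by
      rw [hrem', PySem.Int.mod_eq_emod_of_pos (a := size) hn]
      exact Int.emod_nonneg size (by omega)
    have hmap : List.map (fun (k : Nat) => (0:Int) + (k:Int)) (List.range (n-0).toNat)
        = List.map (fun (k : Nat) => (k:Int)) (List.range (n-0).toNat) := by
      simp
    rw [hmap, List.foldl_map]
    rw [compute_edges_loop base rem hrem ((n-0).toNat)]
    rw [List.range_succ]
    simp only [List.map_append, List.map_cons, List.map_nil, List.dropLast_concat, List.map_map]
    rfl
  · have hn' : (n - 0).toNat = 0 := by omega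
    rw [hn']
    simp
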